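-- pv_equiv track=rewrite | github.com/dancarmoz/AoC2023 | 2023/day14.py | score_line
-- ===== SOURCE A (Python) =====
-- def score_line(line):
--     res = 0
--     score = n = len(line)
--     for i, s in enumerate(line):
--         if s == '#': score = n - i - 1
--         elif s == 'O':
--             res += score
--             score -= 1
--     return res
-- ===== SOURCE B (Python) =====
-- def score_line(line):
--     n = len(line)
--     total = 0
--     start = 0
--     for part in line.split('#'):
--         k = part.count('O')
--         top = n - start
--         total += k * top - k * (k - 1) // 2
--         start += len(part) + 1
--     return total
-- ===== Notes on version B (the rewrite author's own statement) =====
-- stated objective: faster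
-- what changed: Replaces the per-character running-score simulation by splitting the line at '#' walls and adding a closed-form arithmetic-series load k*(n-start) - k*(k-1)//2 per wall-bounded segment (bulk C-level split/count instead of a Python char loop).
import Mathlib
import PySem

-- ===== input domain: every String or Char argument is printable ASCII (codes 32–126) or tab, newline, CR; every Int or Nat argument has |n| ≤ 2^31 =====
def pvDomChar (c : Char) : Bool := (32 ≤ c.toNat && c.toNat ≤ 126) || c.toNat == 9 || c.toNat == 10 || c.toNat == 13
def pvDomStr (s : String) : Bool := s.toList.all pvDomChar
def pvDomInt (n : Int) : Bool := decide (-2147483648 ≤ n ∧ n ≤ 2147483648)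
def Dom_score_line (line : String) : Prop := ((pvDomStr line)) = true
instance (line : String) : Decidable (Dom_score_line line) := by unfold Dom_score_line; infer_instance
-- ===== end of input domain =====

-- B replaces A's per-character running-score simulation by a '#'-split with a
-- closed-form arithmetic-series load per wall-bounded segment (alternative
-- decomposition, same asymptotic cost).

-- ===== PORT A =====
-- the 'for i, s in enumerate(line)' loop over state (score, res); n is len(line)
def scoreLoop (n : Int) : List Char → Int → Int → Int → Int
  | [], _, _, res => res
  | c :: rest, i, score, res =>
    if c = '#' then scoreLoop n rest (i + 1) (n - i - 1) res
    else if c = 'O' then scoreLoop n rest (i + 1) (score - 1) (res + score)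
    else scoreLoop n rest (i + 1) score res

def score_line (line : String) : Int :=
  let cs := line.toList
  let n : Int := cs.length
  scoreLoop n cs 0 n 0

-- ===== PORT B =====
-- line.split('#') for the one-char separator '#' is exactly List.splitOn '#' on
-- the char list, and part.count('O') for the one-char needle is List.count 'O';
-- the fold carries Source B's loop state (total, start).
def score_line_alt (line : String) : Int :=
  let cs := line.toList
  let n : Int := cs.length
  let st := (List.splitOn '#' cs).foldl
    (fun (st : Int × Int) part =>
      let k : Int := (part.count 'O' : Int)
      let top : Int := n - st.2
      (st.1 + (k * top - PySem.Int.floordiv (k * (k - 1)) 2),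
       st.2 + part.length + 1))
    (0, 0)
  st.1

-- ===== PRECONDITION & SPEC =====
def Spec_score_line (line : String) (out : Int) : Prop := out = score_line_alt line
instance (line : String) (out : Int) : Decidable (Spec_score_line line out) := by unfold Spec_score_line; infer_instance

-- ===== CLAIM (what is proved, stated in full; the proofs are below) =====
def Claim_equal_score_line : Prop := ∀ (line : String), Dom_score_line line → Spec_score_line line (score_line line)

-- ===== LEMMAS AND PROOFS =====

-- reference recursion: p is the "position value" n - i, score as in A
def refG : List Char → Int → Int → Int
  | [], _, _ => 0
  | c :: rest, p, score =>
    if c = '#' then refG rest (p - 1) (p - 1)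
    else if c = 'O' then score + refG rest (p - 1) (score - 1)
    else refG rest (p - 1) score

-- triangle numbers 0 + 1 + … + (k-1)
def tri : Nat → Int
  | 0 => 0
  | k + 1 => tri k + k

-- segment-wise accumulation: each part contributes its closed-form load at top slot p
def segAcc : List (List Char) → Int → Int
  | [], _ => 0
  | part :: parts, p =>
    (part.count 'O' : Int) * p - tri (part.count 'O') + segAcc parts (p - part.length - 1)

theorem scoreLoop_eq_refG (n : Int) (cs : List Char) :
    ∀ (i score res : Int), scoreLoop n cs i score res = res + refG cs (n - i) score := by
  induction cs with
  | nil => intro i score res; simp [scoreLoop, refG]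
  | cons c rest ih =>
    intro i score res
    simp only [scoreLoop, refG]
    split_ifs with h1 h2
    · rw [ih]; ring_nf
    · rw [ih]; ring_nf
    · rw [ih]; ring_nf

theorem refG_eq_segAcc (cs : List Char) :
    ∀ (p score : Int) (part : List Char) (parts : List (List Char)),
      List.splitOnP (· == '#') cs = part :: parts →
      refG cs p score =
        (part.count 'O' : Int) * score - tri (part.count 'O') +
          segAcc parts (p - part.length - 1) := by
  induction cs with
  | nil =>
    intro p score part parts h
    rw [List.splitOnP_nil] at h
    cases h
    simp [refG, tri, segAcc]
  | cons c rest ih =>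
    intro p score part parts h
    rw [List.splitOnP_cons] at h
    obtain ⟨q, qs, hq⟩ : ∃ q qs, List.splitOnP (· == '#') rest = q :: qs := by
      cases hrest : List.splitOnP (· == '#') rest with
      | nil => exact absurd hrest (List.splitOnP_ne_nil _ _)
      | cons q qs => exact ⟨q, qs, rfl⟩
    by_cases hc : c = '#'
    · subst hc
      simp only [beq_self_eq_true, if_true] at h
      cases h
      have hseg := ih (p - 1) (p - 1) q qs hq
      simp [refG, hseg, segAcc, hq, tri]
    · rw [if_neg (by simpa using hc), hq, List.modifyHead] at h
      obtain ⟨h1, h2⟩ := List.cons_eq_cons.mp h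
      subst h1; subst h2
      by_cases hO : c = 'O'
      · subst hO
        have hIH := ih (p - 1) (score - 1) q qs hq
        have hcnt : List.count 'O' ('O' :: q) = List.count 'O' q + 1 := by
          simp
        simp only [refG, if_neg hc, hIH, hcnt, tri, List.length_cons]
        push_cast
        ring_nf
      · have hIH := ih (p - 1) score q qs hq
        have hcnt : List.count 'O' (c :: q) = List.count 'O' q := by
          simp [hO]
        simp only [refG, if_neg hc, if_neg hO, hIH, hcnt, List.length_cons]
        push_cast
        ring_nf

theorem floordiv_tri (k : Nat) :
    PySem.Int.floordiv ((k : Int) * ((k : Int) - 1)) 2 = tri k := by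
  induction k with
  | zero => decide
  | succ k ih =>
    rw [PySem.Int.floordiv_eq_ediv_of_pos (by omega)] at *
    have h1 : ((k + 1 : Nat) : Int) * (((k + 1 : Nat) : Int) - 1)
        = (k : Int) * ((k : Int) - 1) + (k : Int) * 2 := by push_cast; ring
    rw [h1, Int.add_mul_ediv_right _ _ (by omega), ih, tri]

theorem foldl_eq_segAcc (n : Int) (parts : List (List Char)) :
    ∀ (st : Int × Int),
      (parts.foldl
        (fun (st : Int × Int) part =>
          let k : Int := (part.count 'O' : Int)
          let top : Int := n - st.2
          (st.1 + (k * top - PySem.Int.floordiv (k * (k - 1)) 2),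
           st.2 + part.length + 1))
        st).1 = st.1 + segAcc parts (n - st.2) := by
  induction parts with
  | nil => intro st; simp [segAcc]
  | cons part rest ih =>
    intro st
    rw [List.foldl_cons, ih]
    simp only [segAcc, floordiv_tri]
    ring_nf

-- ===== VERDICT (by name: the statement is the Claim_ definition above) =====
theorem score_line_spec : Claim_equal_score_line := by
  intro line _
  unfold Spec_score_line score_line score_line_alt
  simp only []
  obtain ⟨q, qs, hq⟩ : ∃ q qs, List.splitOnP (· == '#') line.toList = q :: qs := by
    cases hrest : List.splitOnP (· == '#') line.toList with
    | nil => exact absurd hrest (List.splitOnP_ne_nil _ _)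
    | cons q qs => exact ⟨q, qs, rfl⟩
  have hsplit : List.splitOn '#' line.toList = q :: qs := hq
  rw [scoreLoop_eq_refG, hsplit, foldl_eq_segAcc,
    refG_eq_segAcc line.toList ((line.toList.length : Int) - 0) (line.toList.length : Int) q qs hq]
  simp [segAcc]
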